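-- pv_equiv track=rewrite | github.com/BenderEg/Bioinformatics | Entopy calculation.py | distance_determination
-- ===== SOURCE A (Python) =====
-- def find_Hamming_distance(p, q):
--     result = 0
--     for i in range(len(p)):
--         if p[i] != q[i]:
--             result += 1
--     return result
--
-- def distance_determination(Pattern, DNA):
--     distance = 0
--     DNA_number = 0
--     for ele in DNA:
--         local_min = len(Pattern)
--         for i in range(len(ele) - len(Pattern) + 1):
--             text = ele[i:i + len(Pattern)]
--             d = find_Hamming_distance(text, Pattern)
--             if d < local_min:
--                 local_min = d
--         distance += local_min
--     return distance
-- ===== SOURCE B (Python) =====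
-- def distance_determination(Pattern, DNA):
--     # Recursive suffix decomposition: min distance over windows of s computed
--     # by comparing the length-|Pattern| prefix of each suffix, via zip.
--     def min_dist(s, p):
--         if len(s) < len(p):
--             return len(p)
--         d = sum(1 for a, b in zip(s, p) if a != b)
--         if len(s) == len(p):
--             return d
--         return min(d, min_dist(s[1:], p))
--     return sum(min_dist(ele, Pattern) for ele in DNA)
-- ===== Notes on version B (the rewrite author's own statement) =====
-- stated objective: alternative
-- what changed: Replaced A's index-range loop over window start positions with slicing and an index-loop Hamming helper by a structural recursion on the suffixes of each DNA string whose per-window mismatch count is a zip-based fold, summed over strings.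
import Mathlib
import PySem

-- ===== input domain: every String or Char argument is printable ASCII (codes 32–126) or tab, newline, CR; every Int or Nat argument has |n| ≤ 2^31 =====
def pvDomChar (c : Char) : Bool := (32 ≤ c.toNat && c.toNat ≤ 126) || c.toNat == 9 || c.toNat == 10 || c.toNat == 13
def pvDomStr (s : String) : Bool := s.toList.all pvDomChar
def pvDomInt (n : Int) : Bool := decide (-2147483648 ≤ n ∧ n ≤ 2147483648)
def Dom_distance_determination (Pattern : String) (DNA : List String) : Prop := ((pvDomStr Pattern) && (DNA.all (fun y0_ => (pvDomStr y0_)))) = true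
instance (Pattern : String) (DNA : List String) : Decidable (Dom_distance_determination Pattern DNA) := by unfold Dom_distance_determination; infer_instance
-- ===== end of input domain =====

-- B replaces A's index-loop window scan by a structural recursion on suffixes with a
-- zip-based Hamming count (objective: alternative decomposition, same asymptotic cost).

-- ===== PORT A =====
-- p[i] / q[i] via pyGet?; at every call site inside distance_determination the two
-- strings have equal length, so both lookups are in range (Python never raises here).
def find_Hamming_distance (p q : List Char) : Int :=
  (PySem.List.pyRange 0 (p.length : Int) 1).foldl
    (fun result i =>
      if PySem.List.pyGet? p i ≠ PySem.List.pyGet? q i then result + 1 else result) 0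

def distance_determination (Pattern : String) (DNA : List String) : Int :=
  DNA.foldl
    (fun distance ele =>
      let P := Pattern.toList
      let E := ele.toList
      let local_min :=
        (PySem.List.pyRange 0 ((E.length : Int) - (P.length : Int) + 1) 1).foldl
          (fun local_min i =>
            let text := PySem.List.slice E (some i) (some (i + (P.length : Int)))
            let d := find_Hamming_distance text P
            if d < local_min then d else local_min)
          (P.length : Int)
      distance + local_min)
    0

-- ===== PORT B =====
-- sum(1 for a, b in zip(s, p) if a != b)
def hamming_zip (s p : List Char) : Int :=
  (s.zip p).foldl (fun acc ab => if ab.1 ≠ ab.2 then acc + 1 else acc) 0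

-- min_dist from Source B: recursion on the suffixes of s (s[1:] = drop 1)
def min_dist (s p : List Char) : Int :=
  if s.length < p.length then (p.length : Int)
  else
    let d := hamming_zip s p
    if s.length = p.length then d
    else min d (min_dist (s.drop 1) p)
termination_by s.length
decreasing_by simp; omega

def distance_determination_alt (Pattern : String) (DNA : List String) : Int :=
  (DNA.map (fun ele => min_dist ele.toList Pattern.toList)).sum

-- ===== PRECONDITION & SPEC =====
def Spec_distance_determination (Pattern : String) (DNA : List String) (out : Int) : Prop := out = distance_determination_alt Pattern DNA
instance (Pattern : String) (DNA : List String) (out : Int) : Decidable (Spec_distance_determination Pattern DNA out) := by unfold Spec_distance_determination; infer_instance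

-- ===== CLAIM (what is proved, stated in full; the proofs are below) =====
def Claim_equal_distance_determination : Prop := ∀ (Pattern : String) (DNA : List String), Dom_distance_determination Pattern DNA → Spec_distance_determination Pattern DNA (distance_determination Pattern DNA)

-- ===== LEMMAS AND PROOFS =====

-- zip truncates at the shorter list: only the first p.length items of s matter
lemma zip_take_left (s p : List Char) : (s.take p.length).zip p = s.zip p := by
  induction s generalizing p with
  | nil => simp
  | cons a s ih =>
    cases p with
    | nil => simp
    | cons b p => simp [ih]

lemma hamming_zip_eq_countP (s p : List Char) :
    hamming_zip s p = ((s.zip p).countP (fun ab => ab.1 ≠ ab.2) : Int) := by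
  unfold hamming_zip
  simpa using PySem.List.foldl_count_if (fun ab => decide (ab.1 ≠ ab.2)) (s.zip p) 0

lemma hamming_zip_le (s p : List Char) : hamming_zip s p ≤ (p.length : Int) := by
  rw [hamming_zip_eq_countP]
  have h1 : (s.zip p).countP (fun ab => ab.1 ≠ ab.2) ≤ (s.zip p).length :=
    List.countP_le_length
  have h2 : (s.zip p).length ≤ p.length := by simp
  exact_mod_cast le_trans h1 h2

-- A's index-loop Hamming helper equals B's zip-based count when the indices stay in range
lemma find_eq_hamming (t p : List Char) (h : t.length ≤ p.length) :
    find_Hamming_distance t p = hamming_zip t p := by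
  unfold find_Hamming_distance
  have hcongr :
      (PySem.List.pyRange 0 (t.length : Int) 1).foldl
        (fun result i =>
          if PySem.List.pyGet? t i ≠ PySem.List.pyGet? p i then result + 1 else result) (0 : Int) =
      (PySem.List.pyRange 0 (t.length : Int) 1).foldl
        (fun result i =>
          (fun acc (ab : Char × Char) => if ab.1 ≠ ab.2 then acc + 1 else acc) result
            (PySem.List.pyGetD (t.zip p) i (' ', ' '))) (0 : Int) := by
    apply PySem.List.foldl_congr_mem
    intro acc i hi
    rw [PySem.List.mem_pyRange_one] at hi
    have h0 : 0 ≤ i := hi.1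
    have htoN : i.toNat < t.length := by omega
    have hpN : i.toNat < p.length := by omega
    have hiz : i < ((t.zip p).length : Int) := by simp; omega
    rw [PySem.List.pyGetD_eq_getElem _ _ h0 hiz]
    have h1 : PySem.List.pyGet? t i = some t[i.toNat] := by
      conv_lhs => rw [show i = ((i.toNat : Nat) : Int) by omega, PySem.List.pyGet?_natCast]
      exact List.getElem?_eq_getElem htoN
    have h2 : PySem.List.pyGet? p i = some p[i.toNat] := by
      conv_lhs => rw [show i = ((i.toNat : Nat) : Int) by omega, PySem.List.pyGet?_natCast]
      exact List.getElem?_eq_getElem hpN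
    rw [h1, h2]
    simp [List.getElem_zip]
  refine hcongr.trans ?_
  rw [show ((t.length : Int)) = PySem.List.len (t.zip p) by simp [PySem.List.len_eq]; omega]
  exact PySem.List.foldl_pyRange_zero_pyGetD (t.zip p) (' ', ' ')
    (fun acc (ab : Char × Char) => if ab.1 ≠ ab.2 then acc + 1 else acc) (0 : Int)

-- the if-step of A's inner loop is a min
lemma step_eq_min (d lm : Int) : (if d < lm then d else lm) = min lm d := by
  rw [min_def]; split_ifs <;> omega

-- pulling a min through a foldl of mins
lemma foldl_min_pull {α : Type} (D : α → Int) (l : List α) (a b : Int) :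
    l.foldl (fun lm i => min lm (D i)) (min b a) =
      min a (l.foldl (fun lm i => min lm (D i)) b) := by
  induction l generalizing b with
  | nil => simp [min_comm]
  | cons x l ih =>
    simp only [List.foldl_cons]
    rw [show min (min b a) (D x) = min (min b (D x)) a by
      rw [min_assoc, min_assoc, min_comm a (D x)]]
    exact ih (min b (D x))

-- the inner loop of A, as a function of the element and the pattern
def innerA (e p : List Char) : Int :=
  (PySem.List.pyRange 0 ((e.length : Int) - (p.length : Int) + 1) 1).foldl
    (fun local_min i =>
      if find_Hamming_distance (PySem.List.slice e (some i) (some (i + (p.length : Int)))) p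
          < local_min
        then find_Hamming_distance (PySem.List.slice e (some i) (some (i + (p.length : Int)))) p
        else local_min)
    (p.length : Int)

-- the window distance at offset j, in B's terms (holds for every j: take/zip clamp alike)
lemma dval (e p : List Char) (j : Nat) :
    find_Hamming_distance
        (PySem.List.slice e (some (j : Int)) (some ((j : Int) + (p.length : Int)))) p
      = hamming_zip (e.drop j) p := by
  rw [PySem.List.slice_natCast_add]
  rw [find_eq_hamming _ _ (by simp)]
  unfold hamming_zip
  rw [zip_take_left]

-- A's inner loop as a fold over a Nat range of B's window distances
lemma innerA_fold (e p : List Char) :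
    innerA e p =
      (List.range ((e.length : Int) - (p.length : Int) + 1).toNat).foldl
        (fun lm j => min lm (hamming_zip (e.drop j) p)) (p.length : Int) := by
  unfold innerA
  rw [PySem.List.pyRange_zero, List.foldl_map]
  congr 1
  funext lm j
  rw [dval, step_eq_min]

lemma innerA_eq_min_dist (e p : List Char) : innerA e p = min_dist e p := by
  induction e with
  | nil =>
    rcases Nat.eq_zero_or_pos p.length with hk | hk
    · -- empty pattern: one window, distance 0
      rw [innerA_fold]
      unfold min_dist
      simp [hk, hamming_zip]
    · -- no window fits: both sides return p.length
      rw [innerA_fold]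
      unfold min_dist
      rw [if_pos (by simpa using hk)]
      rw [show ((([] : List Char).length : Int) - (p.length : Int) + 1).toNat = 0 by simp; omega]
      simp
  | cons c e' ih =>
    by_cases hlt : (c :: e').length < p.length
    · rw [innerA_fold]
      unfold min_dist
      rw [if_pos hlt]
      rw [show ((((c :: e').length : Int)) - (p.length : Int) + 1).toNat = 0 by omega]
      simp
    · have hge : p.length ≤ (c :: e').length := by omega
      have hM : ((((c :: e').length : Int)) - (p.length : Int) + 1).toNat
          = ((c :: e').length - p.length) + 1 := by omega
      rw [innerA_fold, hM, List.range_succ_eq_map, List.foldl_cons, List.foldl_map]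
      have hd0 : min ((p.length : Int)) (hamming_zip ((c :: e').drop 0) p)
          = hamming_zip (c :: e') p := by
        rw [List.drop_zero]
        exact min_eq_right (hamming_zip_le _ _)
      rw [hd0]
      by_cases heq : (c :: e').length = p.length
      · -- exactly one window
        rw [show (c :: e').length - p.length = 0 by omega]
        unfold min_dist
        rw [if_neg hlt, if_pos heq]
        simp
      · -- at least two windows: peel the first and recurse on the tail e'
        have hN : (c :: e').length - p.length = (e'.length - p.length) + 1 := by
          simp at hlt heq ⊢; omega
        have hbody : (fun (lm : Int) (j : Nat) => min lm (hamming_zip ((c :: e').drop (j + 1)) p))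
            = (fun (lm : Int) (j : Nat) => min lm (hamming_zip (e'.drop j) p)) := by
          funext lm j
          rfl
        rw [hbody]
        have hd0le : hamming_zip (c :: e') p ≤ (p.length : Int) := hamming_zip_le _ _
        rw [show hamming_zip (c :: e') p
            = min ((p.length : Int)) (hamming_zip (c :: e') p) from (min_eq_right hd0le).symm]
        rw [foldl_min_pull]
        have hM' : ((e'.length : Int) - (p.length : Int) + 1).toNat
            = (e'.length - p.length) + 1 := by simp at hlt heq ⊢; omega
        rw [show (List.range ((c :: e').length - p.length)).foldl
              (fun (lm : Int) (j : Nat) => min lm (hamming_zip (e'.drop j) p)) (p.length : Int)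
            = innerA e' p by rw [innerA_fold, hM', ← hN]]
        rw [ih]
        conv_rhs => rw [min_dist]
        rw [if_neg hlt, if_neg heq]
        rfl

-- fold of sums vs sum of map
lemma foldl_add_map (g : String → Int) (l : List String) (acc : Int) :
    l.foldl (fun d e => d + g e) acc = acc + (l.map g).sum := by
  induction l generalizing acc with
  | nil => simp
  | cons x l ih => simp [ih, add_assoc]

-- ===== VERDICT (by name: the statement is the Claim_ definition above) =====
theorem distance_determination_spec : Claim_equal_distance_determination := by
  intro Pattern DNA _
  unfold Spec_distance_determination distance_determination distance_determination_alt
  refine Eq.trans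
    (PySem.List.foldl_congr_mem DNA _
      (fun distance ele => distance + min_dist ele.toList Pattern.toList) 0 ?_) ?_
  · intro acc ele _
    show acc + innerA ele.toList Pattern.toList = acc + min_dist ele.toList Pattern.toList
    rw [innerA_eq_min_dist]
  · exact (foldl_add_map (fun ele => min_dist ele.toList Pattern.toList) DNA 0).trans (by simp)
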